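-- pv_equiv track=rewrite | github.com/timManas/Practice | Python/project/src/Math/ReverseAnImage/ReverseAnImage.py | flipAndReverse
-- ===== SOURCE A (Python) =====
-- def flipAndReverse(A):
--     for subArray in A:
--         for i in range(subArray.__len__()):
--             if subArray[i] == 0:
--                 subArray[i] = 1
--             else:
--                 subArray[i] = 0
--         subArray.reverse()
--
--     return A
-- ===== SOURCE B (Python) =====
-- def flipAndReverse(A):
--     # Two-pointer in-place: swap symmetric cells while flipping both,
--     # flipping the middle cell alone for odd-length rows.
--     for row in A:
--         i, j = 0, len(row) - 1
--         while i < j: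
--             row[i], row[j] = (1 if row[j] == 0 else 0), (1 if row[i] == 0 else 0)
--             i += 1
--             j -= 1
--         if i == j:
--             row[i] = 1 if row[i] == 0 else 0
--     return A
-- ===== Notes on version B (the rewrite author's own statement) =====
-- stated objective: alternative
-- what changed: Replaces the flip-every-cell index loop followed by list.reverse() with a single two-pointer in-place pass that swaps symmetric cells while flipping them, handling the middle cell separately for odd-length rows.
import Mathlib
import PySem

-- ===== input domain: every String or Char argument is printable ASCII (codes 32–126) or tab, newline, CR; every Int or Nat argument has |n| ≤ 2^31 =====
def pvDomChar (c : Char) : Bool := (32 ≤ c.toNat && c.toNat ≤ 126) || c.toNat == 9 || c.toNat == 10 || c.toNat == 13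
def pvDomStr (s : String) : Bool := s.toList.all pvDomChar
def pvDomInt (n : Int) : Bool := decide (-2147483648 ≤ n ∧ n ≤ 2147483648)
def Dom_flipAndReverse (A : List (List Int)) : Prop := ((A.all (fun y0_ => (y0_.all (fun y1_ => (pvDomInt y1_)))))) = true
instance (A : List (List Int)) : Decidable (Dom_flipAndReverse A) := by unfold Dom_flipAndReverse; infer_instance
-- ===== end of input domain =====

-- B replaces A's flip-index-loop-then-reverse per row with a two-pointer pass that swaps
-- symmetric cells while flipping them (alternative decomposition); both Pythons mutate the
-- rows of A in place identically, the proof is about the returned value.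

-- ===== PORT A =====
-- inner index loop: 'for i in range(len(subArray)): subArray[i] = 1 if subArray[i]==0 else 0'
def flipRowA (row : List Int) : List Int :=
  (PySem.List.pyRange 0 row.length 1).foldl
    (fun r i => if PySem.List.pyGetD r i 0 == 0 then PySem.List.pySetD r i 1 else PySem.List.pySetD r i 0)
    row

def flipAndReverse (A : List (List Int)) : List (List Int) :=
  A.map (fun subArray => (flipRowA subArray).reverse)

-- ===== PORT B =====
def flipB (v : Int) : Int := if v == 0 then 1 else 0

-- B's two-pointer while loop, transcribed structurally: each iteration takes the current
-- front cell (pointer i) and current back cell (pointer j), emits them flipped in swapped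
-- positions, and recurses on the strictly shorter middle segment; the 'i == j' leftover
-- middle cell is the singleton case.
def flipRevTwoPtr : List Int → List Int
  | [] => []
  | [x] => [flipB x]
  | x :: y :: rest =>
      flipB ((y :: rest).getLast (by simp)) ::
        (flipRevTwoPtr (y :: rest).dropLast ++ [flipB x])
termination_by l => l.length
decreasing_by simp

def flipAndReverse_alt (A : List (List Int)) : List (List Int) :=
  A.map flipRevTwoPtr

-- ===== PRECONDITION & SPEC =====
def Spec_flipAndReverse (A : List (List Int)) (out : List (List Int)) : Prop := out = flipAndReverse_alt A
instance (A : List (List Int)) (out : List (List Int)) : Decidable (Spec_flipAndReverse A out) := by unfold Spec_flipAndReverse; infer_instance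

-- ===== CLAIM (what is proved, stated in full; the proofs are below) =====
def Claim_equal_flipAndReverse : Prop := ∀ (A : List (List Int)), Dom_flipAndReverse A → Spec_flipAndReverse A (flipAndReverse A)

-- ===== LEMMAS AND PROOFS =====
-- A's index loop, having already flipped the prefix 'pre', flips the suffix 'xs' elementwise.
theorem flipRowA_aux (pre xs : List Int) :
    (PySem.List.pyRange (pre.length : Int) ((pre.length : Int) + xs.length) 1).foldl
      (fun r i => if PySem.List.pyGetD r i 0 == 0 then PySem.List.pySetD r i 1 else PySem.List.pySetD r i 0)
      (pre ++ xs)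
    = pre ++ xs.map flipB := by
  induction xs generalizing pre with
  | nil => simp [PySem.List.pyRange_one_eq_nil]
  | cons x xs ih =>
    rw [PySem.List.pyRange_one_cons (by
      have h0 : (0:Int) < ((x :: xs).length : Int) := by exact_mod_cast (Nat.succ_pos xs.length)
      omega)]
    have hget : PySem.List.pyGetD (pre ++ x :: xs) (pre.length : Int) 0 = x := by
      simp [PySem.List.pyGetD]
    have hset : ∀ v : Int, PySem.List.pySetD (pre ++ x :: xs) (pre.length : Int) v
        = (pre ++ [v]) ++ xs := by
      intro v
      rw [PySem.List.pySetD_natCast, List.set_append_right _ _ (le_refl _)]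
      simp
    have hkey := ih (pre ++ [flipB x])
    simp only [List.length_append, List.length_singleton] at hkey
    have harith : ((pre.length : Int)) + 1 + (xs.length : Int)
        = (pre.length : Int) + ((x :: xs).length : Int) := by
      have : ((x :: xs).length : Int) = (xs.length : Int) + 1 := by exact_mod_cast rfl
      rw [this]; ring
    push_cast at hkey
    rw [harith] at hkey
    simp only [List.foldl_cons, hget, hset]
    by_cases h : x = 0 <;> simpa [List.append_assoc, flipB, h] using hkey

theorem flipRowA_eq_map (row : List Int) :
    flipRowA row = row.map flipB := by
  have h := flipRowA_aux [] row
  simpa [flipRowA] using h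

theorem flipRevTwoPtr_eq (row : List Int) :
    flipRevTwoPtr row = row.reverse.map flipB := by
  fun_induction flipRevTwoPtr row with
  | case1 => rfl
  | case2 x => rfl
  | case3 x y rest ih =>
    have hl : (y :: rest).dropLast ++ [(y :: rest).getLast (by simp)] = y :: rest :=
      List.dropLast_append_getLast (by simp)
    calc flipB ((y :: rest).getLast (by simp)) ::
          (flipRevTwoPtr (y :: rest).dropLast ++ [flipB x])
        = flipB ((y :: rest).getLast (by simp)) ::
          (((y :: rest).dropLast.reverse.map flipB) ++ [flipB x]) := by rw [ih]
      _ = (((y :: rest).dropLast ++ [(y :: rest).getLast (by simp)]).reverse.map flipB)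
            ++ [flipB x] := by simp
      _ = ((x :: y :: rest).reverse.map flipB) := by rw [hl]; simp

-- ===== VERDICT (by name: the statement is the Claim_ definition above) =====
theorem flipAndReverse_spec : Claim_equal_flipAndReverse := by
  intro A _
  unfold Spec_flipAndReverse flipAndReverse flipAndReverse_alt
  refine List.map_congr_left (fun r _ => ?_)
  rw [flipRowA_eq_map, flipRevTwoPtr_eq, List.map_reverse]
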